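-- pv_equiv track=rewrite | github.com/AymenTrabelsi7/AlgoIA | puissance4.py | jouerCoup
-- ===== SOURCE A (Python) =====
-- def jouerCoup(etat, coup, joueur):
--     # Modifier l'état en jouant un coup
--     # et retourne True/False si le coup est/n'est pas possible
--
--     if etat[0][coup] != 0:
--         return False
--
--     h = 0
--     while h < 6 and etat[h][coup] == 0:
--         h = h + 1
--
--     etat[h - 1][coup] = joueur
--     return True
-- ===== SOURCE B (Python) =====
-- def jouerCoup(etat, coup, joueur):
--     # Recursive descent down the column: each cell is read once; the full-column
--     # guard disappears (a column is full exactly when the descent stops at row 0).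
--     return _drop(etat, coup, joueur, 0)
--
-- def _drop(etat, coup, joueur, h):
--     if h == 6 or etat[h][coup] != 0:
--         if h == 0:
--             return False
--         etat[h - 1][coup] = joueur
--         return True
--     return _drop(etat, coup, joueur, h + 1)
-- ===== Notes on version B (the rewrite author's own statement) =====
-- stated objective: simpler
-- what changed: Replaces A's duplicate top-cell guard plus while-loop boundary search by a single recursive descent that reads each cell once and decides full-column by stopping at row 0, with placement folded into the base case.
import Mathlib
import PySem

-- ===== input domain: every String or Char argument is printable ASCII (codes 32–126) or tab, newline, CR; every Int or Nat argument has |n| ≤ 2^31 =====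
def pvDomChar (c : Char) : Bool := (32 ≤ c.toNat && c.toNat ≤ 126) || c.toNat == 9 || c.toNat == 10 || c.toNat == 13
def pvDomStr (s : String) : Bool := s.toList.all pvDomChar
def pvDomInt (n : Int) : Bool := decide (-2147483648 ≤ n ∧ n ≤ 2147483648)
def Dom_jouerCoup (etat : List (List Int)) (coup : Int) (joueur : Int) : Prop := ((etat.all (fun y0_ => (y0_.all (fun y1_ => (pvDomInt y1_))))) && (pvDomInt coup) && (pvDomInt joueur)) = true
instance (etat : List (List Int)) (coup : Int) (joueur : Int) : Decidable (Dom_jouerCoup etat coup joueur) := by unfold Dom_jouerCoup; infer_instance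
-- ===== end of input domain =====

-- B replaces A's duplicate top-cell guard plus while-loop boundary search by one recursive
-- descent reading each cell once (simpler decomposition); both mutate etat in Python, the
-- theorem is about the return value only (the mutation coincides as well).


-- cell at row h, column coup (none = IndexError in Python)
def pvCell (etat : List (List Int)) (coup : Int) (h : Int) : Option Int :=
  (PySem.List.pyGet? etat h).bind (fun r => PySem.List.pyGet? r coup)

-- ===== PORT A =====
-- the while loop: h starts at 0, advances while h < 6 and etat[h][coup] == 0
-- (a none cell is an IndexError in Python — outside Pre_, the port just stops there)
def jouerCoupWhile (etat : List (List Int)) (coup : Int) (h : Nat) : Nat :=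
  if h < 6 then
    match pvCell etat coup h with
    | some v => if v = 0 then jouerCoupWhile etat coup (h + 1) else h
    | none => h
  else h
termination_by 6 - h

def jouerCoup (etat : List (List Int)) (coup : Int) (joueur : Int) : Bool :=
  match pvCell etat coup 0 with
  | none => false            -- IndexError in Python (outside Pre_)
  | some v0 =>
    if v0 ≠ 0 then false
    else
      let _h := jouerCoupWhile etat coup 0   -- determines the landing row (mutation not modelled)
      true

-- ===== PORT B =====
-- _drop: if h == 6 or etat[h][coup] != 0: (False if h == 0 else place at h-1; True) else recurse
def jouerCoupDrop (etat : List (List Int)) (coup : Int) (joueur : Int) (h : Nat) : Bool :=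
  -- Python tests 'h == 6'; h is a Nat only ever incremented from 0, so '6 ≤ h' is the
  -- same test, phrased so the termination measure 6 - h decreases
  if 6 ≤ h then (if h = 0 then false else true)
  else
    match pvCell etat coup h with
    | none => false          -- IndexError in Python (outside Pre_)
    | some v =>
      if v ≠ 0 then (if h = 0 then false else true)   -- place joueur at row h-1 when h ≠ 0
      else jouerCoupDrop etat coup joueur (h + 1)
termination_by 6 - h

def jouerCoup_alt (etat : List (List Int)) (coup : Int) (joueur : Int) : Bool :=
  jouerCoupDrop etat coup joueur 0

-- ===== PRECONDITION & SPEC =====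
-- Pre_ = exactly the inputs where A returns (no IndexError): the played column has a
-- well-defined landing point — an initial all-zero segment of h0 indexable cells ended
-- either by the 6-row limit or by an indexable nonzero cell.
def Pre_jouerCoup (etat : List (List Int)) (coup : Int) (joueur : Int) : Prop :=
  ∃ h0 : Nat, h0 < 7 ∧ (∀ k : Nat, k < h0 → pvCell etat coup k = some 0) ∧
    (h0 = 6 ∨ ((pvCell etat coup h0).isSome = true ∧ pvCell etat coup h0 ≠ some 0))
instance (etat : List (List Int)) (coup : Int) (joueur : Int) : Decidable (Pre_jouerCoup etat coup joueur) := by unfold Pre_jouerCoup; infer_instance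

def pvWitness_jouerCoup : List (List Int) × Int × Int :=
  ([[0, 0], [0, 0], [0, 1], [0, 1], [0, 2], [1, 2]], 1, 2)

def Spec_jouerCoup (etat : List (List Int)) (coup : Int) (joueur : Int) (out : Bool) : Prop := out = jouerCoup_alt etat coup joueur
instance (etat : List (List Int)) (coup : Int) (joueur : Int) (out : Bool) : Decidable (Spec_jouerCoup etat coup joueur out) := by unfold Spec_jouerCoup; infer_instance

-- ===== CLAIM (what is proved, stated in full; the proofs are below) =====
def Claim_equal_jouerCoup : Prop := ∀ (etat : List (List Int)) (coup : Int) (joueur : Int), Dom_jouerCoup etat coup joueur → Pre_jouerCoup etat coup joueur → Spec_jouerCoup etat coup joueur (jouerCoup etat coup joueur)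

-- ===== LEMMAS AND PROOFS =====

-- once past row 0, the descent always lands: it returns true
theorem jouerCoupDrop_true (etat : List (List Int)) (coup : Int) (joueur : Int)
    (h0 : Nat) (hle : h0 < 7)
    (hzero : ∀ k : Nat, k < h0 → pvCell etat coup k = some 0)
    (hterm : h0 = 6 ∨ ((pvCell etat coup h0).isSome = true ∧ pvCell etat coup h0 ≠ some 0)) :
    ∀ n h : Nat, h0 - h = n → 1 ≤ h → h ≤ h0 → jouerCoupDrop etat coup joueur h = true := by
  intro n
  induction n with
  | zero =>
    intro h hn h1 hh0
    have heq : h = h0 := by omega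
    subst heq
    by_cases h6 : 6 ≤ h
    · rw [jouerCoupDrop.eq_def, if_pos h6, if_neg (by omega : ¬ h = 0)]
    · rcases hterm with h6' | ⟨hs, hne⟩
      · omega
      · obtain ⟨v, hv⟩ := Option.isSome_iff_exists.mp hs
        have hvne : v ≠ 0 := fun h0' => hne (h0' ▸ hv)
        rw [jouerCoupDrop.eq_def, if_neg h6, hv]
        simp [hvne]; omega
  | succ n ih =>
    intro h hn h1 hh0
    have hlt : h < h0 := by omega
    have h6 : ¬ 6 ≤ h := by omega
    have hz := hzero h hlt
    rw [jouerCoupDrop.eq_def, if_neg h6, hz]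
    simp only [ne_eq, not_true_eq_false, if_false]
    exact ih (h + 1) (by omega) (by omega) (by omega)

theorem jouerCoup_spec_aux (etat : List (List Int)) (coup : Int) (joueur : Int)
    (hpre : Pre_jouerCoup etat coup joueur) :
    jouerCoup etat coup joueur = jouerCoup_alt etat coup joueur := by
  obtain ⟨h0, hle, hzero, hterm⟩ := hpre
  have hcast : ((0 : Nat) : Int) = (0 : Int) := rfl
  rcases Nat.eq_zero_or_pos h0 with h00 | h0pos
  · -- column blocked at the top: cell 0 is some v ≠ 0; both return false
    subst h00
    rcases hterm with h6 | ⟨hs, hne⟩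
    · omega
    · obtain ⟨v, hv⟩ := Option.isSome_iff_exists.mp hs
      have hvne : v ≠ 0 := fun h' => hne (h' ▸ hv)
      rw [hcast] at hv
      unfold jouerCoup jouerCoup_alt
      rw [hv, jouerCoupDrop.eq_def, if_neg (by omega : ¬ 6 ≤ (0 : Nat))]
      rw [show pvCell etat coup ((0 : Nat) : Int) = some v from hv]
      simp [hvne]
  · -- cell 0 is zero: A returns true; B descends to row 1 and returns true
    have hz0 := hzero 0 h0pos
    rw [hcast] at hz0
    unfold jouerCoup jouerCoup_alt
    rw [hz0, jouerCoupDrop.eq_def, if_neg (by omega : ¬ 6 ≤ (0 : Nat))]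
    rw [show pvCell etat coup ((0 : Nat) : Int) = some 0 from hz0]
    simp only [ne_eq, not_true_eq_false, if_false]
    exact (jouerCoupDrop_true etat coup joueur h0 hle hzero hterm (h0 - 1) 1 (by omega)
      (by omega) (by omega)).symm

-- ===== VERDICT (by name: the statement is the Claim_ definition above) =====
theorem jouerCoup_spec : Claim_equal_jouerCoup := by
  intro etat coup joueur _ hpre
  exact jouerCoup_spec_aux etat coup joueur hpre
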